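-- pv_equiv track=rewrite | github.com/Sobithan11/Programming-Challenges | Brampton manor academy/As pre release/Parity flags+ extra functions.py | ExecuteMVN
-- ===== SOURCE A (Python) =====
-- ACC = 1
--
-- def ConvertToDecimal(BinaryString):
--   DecimalNumber = 0
--   for Bit in BinaryString:
--     BitValue = int(Bit)
--     DecimalNumber = DecimalNumber * 2 + BitValue
--   return DecimalNumber
--
-- def ExecuteMVN(Registers, Binary1):
--   x=0
--   length=len(Binary1)
--   Result=""
--   while x<length-1:
--     if Binary1[x]=="1":
--       Result+="0"
--     else:
--       Result+="1"
--     x+=1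
--   Registers[ACC]=ConvertToDecimal(Result)
--   return Registers
-- ===== SOURCE B (Python) =====
-- ACC = 1
--
-- def ExecuteMVN(Registers, Binary1):
--   Decimal = 0
--   for ch in Binary1[:-1]:
--     Decimal = Decimal * 2 + (0 if ch == "1" else 1)
--   Registers[ACC] = Decimal
--   return Registers
-- ===== Notes on version B (the rewrite author's own statement) =====
-- stated objective: simpler
-- what changed: Replaces A's two sequential passes (index-driven while loop building an intermediate flipped string, then a separate ConvertToDecimal pass over it) with one fused for-loop over Binary1[:-1] maintaining a single integer accumulator; no intermediate string and no helper.
import Mathlib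
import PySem

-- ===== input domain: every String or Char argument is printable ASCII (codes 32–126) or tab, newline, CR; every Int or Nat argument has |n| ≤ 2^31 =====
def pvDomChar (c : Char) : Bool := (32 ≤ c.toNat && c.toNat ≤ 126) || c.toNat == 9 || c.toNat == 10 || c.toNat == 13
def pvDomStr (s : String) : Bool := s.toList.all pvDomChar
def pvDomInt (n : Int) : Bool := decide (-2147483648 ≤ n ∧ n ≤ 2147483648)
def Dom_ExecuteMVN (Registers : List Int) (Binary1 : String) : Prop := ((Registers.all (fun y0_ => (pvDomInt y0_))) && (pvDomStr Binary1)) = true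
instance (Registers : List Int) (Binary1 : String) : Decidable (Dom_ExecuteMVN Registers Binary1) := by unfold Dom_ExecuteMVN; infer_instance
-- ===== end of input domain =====

-- B fuses A's two passes (flip-string build + ConvertToDecimal) into one accumulator loop; equivalence is about the
-- RETURN value only (the Python A and B both assign Registers[1] in place, identically).


-- ===== PORT A =====
-- ConvertToDecimal: fold over the bits; int(Bit) via PySem.Int.ofStr? — exact here because A only ever calls it
-- on strings of '0'/'1' characters, where ofStr? is always `some` (the .getD 0 is never taken).
def ConvertToDecimalA (BinaryString : List Char) : Int :=
  BinaryString.foldl (fun DecimalNumber Bit =>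
    DecimalNumber * 2 + ((PySem.Int.ofStr? (String.ofList [Bit])).getD 0)) 0

-- the while loop: x from 0 while x < length-1, appending the flipped bit; Binary1[x] via pyGetD — exact because
-- every reachable x satisfies 0 ≤ x < length.
def mvnLoopA (cs : List Char) (len : Int) (x : Int) (Result : List Char) : List Char :=
  if _h : x < len - 1 then
    mvnLoopA cs len (x + 1)
      (Result ++ [if PySem.List.pyGetD cs x ' ' = '1' then '0' else '1'])
  else Result
termination_by (len - 1 - x).toNat
decreasing_by omega

-- Registers[1] = … via pySetD — exact under Pre_ (2 ≤ Registers.length); A raises IndexError otherwise.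
def ExecuteMVN (Registers : List Int) (Binary1 : String) : List Int :=
  PySem.List.pySetD Registers 1
    (ConvertToDecimalA (mvnLoopA Binary1.toList (PySem.Str.len Binary1) 0 []))

-- ===== PORT B =====
def ExecuteMVN_alt (Registers : List Int) (Binary1 : String) : List Int :=
  PySem.List.pySetD Registers 1
    ((PySem.List.slice Binary1.toList none (some (-1))).foldl
      (fun Decimal ch => Decimal * 2 + (if ch = '1' then 0 else 1)) 0)

-- ===== PRECONDITION & SPEC =====
-- A raises IndexError on Registers[1] when the register list has fewer than two entries.
def Pre_ExecuteMVN (Registers : List Int) (Binary1 : String) : Prop := 2 ≤ Registers.length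
instance (Registers : List Int) (Binary1 : String) : Decidable (Pre_ExecuteMVN Registers Binary1) := by unfold Pre_ExecuteMVN; infer_instance
def pvWitness_ExecuteMVN : List Int × String := ([0, 0], "101")

def Spec_ExecuteMVN (Registers : List Int) (Binary1 : String) (out : List Int) : Prop := out = ExecuteMVN_alt Registers Binary1
instance (Registers : List Int) (Binary1 : String) (out : List Int) : Decidable (Spec_ExecuteMVN Registers Binary1 out) := by unfold Spec_ExecuteMVN; infer_instance

-- ===== CLAIM (what is proved, stated in full; the proofs are below) =====
def Claim_equal_ExecuteMVN : Prop := ∀ (Registers : List Int) (Binary1 : String), Dom_ExecuteMVN Registers Binary1 → Pre_ExecuteMVN Registers Binary1 → Spec_ExecuteMVN Registers Binary1 (ExecuteMVN Registers Binary1)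

-- ===== LEMMAS AND PROOFS =====

def pvFlip (c : Char) : Char := if c = '1' then '0' else '1'

lemma mvnLoopA_eq : ∀ (k : Nat) (cs : List Char) (x : Nat) (res : List Char),
    cs.length - 1 - x = k →
    mvnLoopA cs (cs.length : Int) (x : Int) res
      = res ++ ((cs.take (cs.length - 1)).drop x).map pvFlip := by
  intro k
  induction k with
  | zero =>
    intro cs x res h
    rw [mvnLoopA, dif_neg (by omega)]
    rw [List.drop_eq_nil_of_le (by simp; omega)]
    simp
  | succ k ih =>
    intro cs x res h
    have hx : x < cs.length - 1 := by omega
    have hx' : x < cs.length := by omega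
    rw [mvnLoopA, dif_pos (by omega)]
    have : ((x : Int) + 1) = ((x + 1 : Nat) : Int) := by omega
    rw [this, ih cs (x + 1) _ (by omega)]
    have hdrop : (cs.take (cs.length - 1)).drop x
        = cs[x] :: (cs.take (cs.length - 1)).drop (x + 1) := by
      rw [List.drop_eq_getElem_cons (by simp; omega)]
      congr 1
      exact List.getElem_take
    rw [hdrop]
    simp [pvFlip, List.append_assoc, List.getElem?_eq_getElem hx']

lemma convert_flip (l : List Char) :
    ConvertToDecimalA (l.map pvFlip)
      = l.foldl (fun d ch => d * 2 + (if ch = '1' then 0 else 1)) 0 := by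
  unfold ConvertToDecimalA
  rw [List.foldl_map]
  congr 1
  funext d c
  by_cases hc : c = '1' <;> simp [pvFlip, hc] <;> decide

-- ===== VERDICT (by name: the statement is the Claim_ definition above) =====
theorem ExecuteMVN_spec : Claim_equal_ExecuteMVN := by
  intro Registers Binary1 _ _
  unfold Spec_ExecuteMVN ExecuteMVN ExecuteMVN_alt
  have h0 : ((0 : Nat) : Int) = (0 : Int) := rfl
  rw [PySem.Str.len_eq, ← h0, mvnLoopA_eq (Binary1.toList.length - 1 - 0) Binary1.toList 0 [] rfl]
  simp only [List.drop_zero, List.nil_append]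
  rw [convert_flip, PySem.List.slice_to_neg_one, List.dropLast_eq_take]
  norm_num
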